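-- pv_equiv track=rewrite | github.com/Grigor2003/Voice-Activity-Detection | other/data/stamps_utils.py | stamps_to_binary_counts
-- ===== SOURCE A (Python) =====
-- def stamps_to_binary_counts(stamps, target_len):
--     e_ = 0
--     summa = 0
--     binary = []
--     for s, e in stamps:
--         binary.append(s - e_)
--         binary.append(e - s)
--         summa += e - e_
--         e_ = e
--     if target_len is not None and summa < target_len:
--         binary.append(target_len - summa)
--     return binary
-- ===== SOURCE B (Python) =====
-- def stamps_to_binary_counts(stamps, target_len):
--     boundaries = [0]
--     for s, e in stamps:
--         boundaries.append(s)
--         boundaries.append(e)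
--     if target_len is not None and boundaries[-1] < target_len:
--         boundaries.append(target_len)
--     return [boundaries[i + 1] - boundaries[i] for i in range(len(boundaries) - 1)]
-- ===== Notes on version B (the rewrite author's own statement) =====
-- stated objective: alternative
-- what changed: B collects all interval endpoints into a boundary-point list [0, s1, e1, s2, e2, ...] (appending target_len when it exceeds the last boundary) and returns the consecutive differences of that list in a second pass, replacing A's single loop with running e_/summa accumulators.
import Mathlib
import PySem

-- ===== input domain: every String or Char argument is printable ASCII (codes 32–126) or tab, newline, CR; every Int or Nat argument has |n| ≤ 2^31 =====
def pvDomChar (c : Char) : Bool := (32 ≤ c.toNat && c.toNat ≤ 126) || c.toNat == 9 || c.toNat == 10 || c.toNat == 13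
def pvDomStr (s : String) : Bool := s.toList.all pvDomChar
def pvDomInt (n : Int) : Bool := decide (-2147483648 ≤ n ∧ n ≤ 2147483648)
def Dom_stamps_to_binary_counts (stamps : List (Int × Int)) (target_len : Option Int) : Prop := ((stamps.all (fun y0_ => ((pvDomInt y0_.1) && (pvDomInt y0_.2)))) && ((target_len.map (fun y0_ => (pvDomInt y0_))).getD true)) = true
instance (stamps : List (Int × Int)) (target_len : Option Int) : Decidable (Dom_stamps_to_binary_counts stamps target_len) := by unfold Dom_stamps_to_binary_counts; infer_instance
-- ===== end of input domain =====

-- B rebuilds the result as pairwise differences of a boundary-point list (collect points, then diff) instead of A's running e_/summa accumulators; objective: alternative decomposition, same O(n) cost.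


-- ===== PORT A =====
-- state (e_, summa, binary); loop body appends s-e_ and e-s, adds e-e_ to summa, sets e_ := e
def stamps_to_binary_counts (stamps : List (Int × Int)) (target_len : Option Int) : List Int :=
  let st := stamps.foldl
    (fun (acc : Int × Int × List Int) p =>
      (p.2, acc.2.1 + (p.2 - acc.1), acc.2.2 ++ [p.1 - acc.1, p.2 - p.1]))
    (0, 0, [])
  match target_len with
  | none => st.2.2
  | some t => if st.2.1 < t then st.2.2 ++ [t - st.2.1] else st.2.2

-- ===== PORT B =====
-- boundaries = [0] then append s,e per stamp; maybe append target_len; return consecutive differences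
def stamps_to_binary_counts_alt (stamps : List (Int × Int)) (target_len : Option Int) : List Int :=
  let b := stamps.foldl (fun acc p => acc ++ [p.1, p.2]) [0]
  let b2 := match target_len with
    | none => b
    | some t => if (b.getLast?.getD 0) < t then b ++ [t] else b  -- boundaries[-1]: b is never empty (starts at [0])
  List.zipWith (fun x y => y - x) b2 b2.tail  -- the comprehension b2[i+1]-b2[i]

-- ===== PRECONDITION & SPEC =====
def Spec_stamps_to_binary_counts (stamps : List (Int × Int)) (target_len : Option Int) (out : List Int) : Prop := out = stamps_to_binary_counts_alt stamps target_len
instance (stamps : List (Int × Int)) (target_len : Option Int) (out : List Int) : Decidable (Spec_stamps_to_binary_counts stamps target_len out) := by unfold Spec_stamps_to_binary_counts; infer_instance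

-- ===== CLAIM (what is proved, stated in full; the proofs are below) =====
def Claim_equal_stamps_to_binary_counts : Prop := ∀ (stamps : List (Int × Int)) (target_len : Option Int), Dom_stamps_to_binary_counts stamps target_len → Spec_stamps_to_binary_counts stamps target_len (stamps_to_binary_counts stamps target_len)

-- ===== LEMMAS AND PROOFS =====

def pvDiffs (l : List Int) : List Int := List.zipWith (fun x y => y - x) l l.tail

theorem pvDiffs_cons2 (a b : Int) (t : List Int) :
    pvDiffs (a :: b :: t) = (b - a) :: pvDiffs (b :: t) := by
  simp [pvDiffs]

theorem pvDiffs_append_last (l : List Int) (x : Int) (h : l ≠ []) :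
    pvDiffs (l ++ [x]) = pvDiffs l ++ [x - (l.getLast?.getD 0)] := by
  induction l with
  | nil => exact absurd rfl h
  | cons a t ih =>
    cases t with
    | nil => simp [pvDiffs]
    | cons b u =>
      simp only [List.cons_append, pvDiffs_cons2, List.getLast?_cons_cons]
      exact congrArg _ (ih (by simp))

theorem pvFoldA (stamps : List (Int × Int)) :
    ∀ (e0 s0 : Int) (bin : List Int),
    stamps.foldl
      (fun (acc : Int × Int × List Int) p =>
        (p.2, acc.2.1 + (p.2 - acc.1), acc.2.2 ++ [p.1 - acc.1, p.2 - p.1]))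
      (e0, s0, bin)
    = ((e0 :: stamps.flatMap (fun p => [p.1, p.2])).getLast?.getD 0,
       s0 + (e0 :: stamps.flatMap (fun p => [p.1, p.2])).getLast?.getD 0 - e0,
       bin ++ pvDiffs (e0 :: stamps.flatMap (fun p => [p.1, p.2]))) := by
  induction stamps with
  | nil => intro e0 s0 bin; simp [pvDiffs]
  | cons p rest ih =>
    intro e0 s0 bin
    simp only [List.foldl_cons, List.flatMap_cons, List.cons_append, List.nil_append,
      ih, List.getLast?_cons_cons, pvDiffs_cons2, Prod.mk.injEq]
    refine ⟨trivial, by ring, by simp⟩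

-- ===== VERDICT (by name: the statement is the Claim_ definition above) =====
theorem stamps_to_binary_counts_spec : Claim_equal_stamps_to_binary_counts := by
  intro stamps target_len _
  show stamps_to_binary_counts stamps target_len = stamps_to_binary_counts_alt stamps target_len
  unfold stamps_to_binary_counts stamps_to_binary_counts_alt
  rw [pvFoldA, PySem.List.foldl_append_eq_flatMap]
  set L := stamps.flatMap (fun p => [p.1, p.2]) with hLdef
  simp only [List.nil_append, List.singleton_append, zero_add, sub_zero]
  cases target_len with
  | none => simp [pvDiffs]
  | some t =>
    dsimp only
    split_ifs with h
    · show pvDiffs (0 :: L) ++ [t - (0 :: L).getLast?.getD 0] = pvDiffs ((0 :: L) ++ [t])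
      rw [pvDiffs_append_last (0 :: L) t (by simp)]
    · rfl
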